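-- pv_equiv track=rewrite | github.com/The-Bugger-Ducks/help-duck-dashboard | src/models/users/countUsers.py | execute
-- ===== SOURCE A (Python) =====
-- def execute(cursorUser):
--
--   numberOfTotalUsers = 0
--   numberOfUsersAdmin = 0
--   numberOfUsersSupport = 0
--   numberOfUsersClient = 0
--
--   for user in cursorUser:
--     numberOfTotalUsers+=1
--     if user["role"] == "client":
--       numberOfUsersClient+=1
--     if user["role"] == "support":
--       numberOfUsersSupport+=1
--     if user["role"] == "admin":
--       numberOfUsersAdmin+=1
--
--   return {
--     "total_users": numberOfTotalUsers,
--     "total_admins": numberOfUsersAdmin,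
--     "total_supports": numberOfUsersSupport,
--     "total_clients": numberOfUsersClient,
--   }
-- ===== SOURCE B (Python) =====
-- def execute(cursorUser):
--   roles = [user["role"] for user in cursorUser]
--   return {
--     "total_users": len(roles),
--     "total_admins": roles.count("admin"),
--     "total_supports": roles.count("support"),
--     "total_clients": roles.count("client"),
--   }
-- ===== Notes on version B (the rewrite author's own statement) =====
-- stated objective: simpler
-- what changed: B replaces A's single loop with four branching scalar accumulators by a staged computation: extract the role list once, then read each total off it with len and three list.count passes (no hand-maintained counters or branches).
import Mathlib
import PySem

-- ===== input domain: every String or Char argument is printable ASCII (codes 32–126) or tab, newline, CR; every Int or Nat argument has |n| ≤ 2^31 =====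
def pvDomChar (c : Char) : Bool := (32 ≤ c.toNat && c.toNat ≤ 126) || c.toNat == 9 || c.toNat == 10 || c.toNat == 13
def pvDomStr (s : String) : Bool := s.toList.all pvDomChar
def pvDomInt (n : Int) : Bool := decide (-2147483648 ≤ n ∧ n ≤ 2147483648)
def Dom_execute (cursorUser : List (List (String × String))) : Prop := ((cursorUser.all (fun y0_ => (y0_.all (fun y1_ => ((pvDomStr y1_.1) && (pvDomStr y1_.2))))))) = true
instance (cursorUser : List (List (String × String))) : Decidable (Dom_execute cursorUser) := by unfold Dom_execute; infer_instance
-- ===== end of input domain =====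

-- B extracts the role list once, then reads each total with len and three list.count passes
-- instead of A's single loop with four branching accumulators (simpler decomposition, same O(n)).


-- user["role"]: first match in the association list (Python dict lookup); total only under Pre_
def pvRole (user : List (String × String)) : String := (user.lookup "role").getD ""

-- ===== PORT A =====
def execute (cursorUser : List (List (String × String))) : List (String × Int) :=
  let st := cursorUser.foldl (fun (st : Int × Int × Int × Int) user =>
      let t := st.1 + 1
      let c := if pvRole user = "client" then st.2.2.2 + 1 else st.2.2.2
      let s := if pvRole user = "support" then st.2.2.1 + 1 else st.2.2.1
      let a := if pvRole user = "admin" then st.2.1 + 1 else st.2.1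
      (t, a, s, c)) (0, 0, 0, 0)
  [("total_users", st.1), ("total_admins", st.2.1),
   ("total_supports", st.2.2.1), ("total_clients", st.2.2.2)]

-- ===== PORT B =====
def execute_alt (cursorUser : List (List (String × String))) : List (String × Int) :=
  let roles := cursorUser.map pvRole
  [("total_users", (roles.length : Int)),
   ("total_admins", (PySem.List.count roles "admin" : Int)),
   ("total_supports", (PySem.List.count roles "support" : Int)),
   ("total_clients", (PySem.List.count roles "client" : Int))]

-- ===== PRECONDITION & SPEC =====
-- Pre_ excludes users without a "role" key: both A and B raise KeyError there.
def Pre_execute (cursorUser : List (List (String × String))) : Prop :=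
  ∀ u ∈ cursorUser, "role" ∈ u.map Prod.fst
instance (cursorUser : List (List (String × String))) : Decidable (Pre_execute cursorUser) := by unfold Pre_execute; infer_instance

def pvWitness_execute : (List (List (String × String))) :=
  [[("role", "admin")], [("role", "client")], [("name", "d"), ("role", "duck")]]

def Spec_execute (cursorUser : List (List (String × String))) (out : List (String × Int)) : Prop := out = execute_alt cursorUser
instance (cursorUser : List (List (String × String))) (out : List (String × Int)) : Decidable (Spec_execute cursorUser out) := by unfold Spec_execute; infer_instance

-- ===== CLAIM (what is proved, stated in full; the proofs are below) =====
def Claim_equal_execute : Prop := ∀ (cursorUser : List (List (String × String))), Dom_execute cursorUser → Pre_execute cursorUser → Spec_execute cursorUser (execute cursorUser)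

-- ===== LEMMAS AND PROOFS =====

-- A's loop: total counts elements, each role counter counts its matches.
theorem executeLoopA (l : List (List (String × String))) (t a s c : Int) :
    l.foldl (fun (st : Int × Int × Int × Int) user =>
      let t := st.1 + 1
      let c := if pvRole user = "client" then st.2.2.2 + 1 else st.2.2.2
      let s := if pvRole user = "support" then st.2.2.1 + 1 else st.2.2.1
      let a := if pvRole user = "admin" then st.2.1 + 1 else st.2.1
      (t, a, s, c)) (t, a, s, c)
    = (t + l.length,
       a + (l.countP (fun u => pvRole u == "admin") : Int),
       s + (l.countP (fun u => pvRole u == "support") : Int),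
       c + (l.countP (fun u => pvRole u == "client") : Int)) := by
  induction l generalizing t a s c with
  | nil => simp
  | cons u rest ih =>
    simp only [List.foldl_cons, ih, List.length_cons, List.countP_cons]
    refine Prod.ext ?_ (Prod.ext ?_ (Prod.ext ?_ ?_))
    · simp; ring
    · simp; split_ifs <;> ring
    · simp; split_ifs <;> ring
    · simp; split_ifs <;> ring

theorem count_map_pvRole (l : List (List (String × String))) (v : String) :
    PySem.List.count (l.map pvRole) v = l.countP (fun u => pvRole u == v) := by
  rw [PySem.List.count_eq]
  simp [List.count_eq_countP, List.countP_map]; rfl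

-- ===== VERDICT (by name: the statement is the Claim_ definition above) =====
theorem execute_spec : Claim_equal_execute := by
  intro cursorUser _ _
  unfold Spec_execute execute execute_alt
  simp only [executeLoopA, count_map_pvRole, List.length_map, zero_add]
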